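-- pv_equiv track=rewrite | github.com/antoineservais1307/lp_challenge | app_test.py | update_rank_and_division
-- ===== SOURCE A (Python) =====
-- def update_rank_and_division(rank, division, lp_change):
--     ranks = ['Iron', 'Bronze', 'Silver', 'Gold', 'Platinum', 'Diamond', 'Master', 'Grandmaster', 'Challenger']
--     divisions = ['IV', 'III', 'II', 'I']
--
--     division_index = divisions.index(division)
--     new_lp = lp_change
--
--     while new_lp >= 100:
--         new_lp -= 100
--         if division_index > 0:
--             division_index -= 1
--         else:
--             current_rank_index = ranks.index(rank)
--             if current_rank_index < len(ranks) - 1: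
--                 rank = ranks[current_rank_index + 1]
--                 division_index = 3
--             else:
--                 new_lp = 100
--
--     division = divisions[division_index]
--     return rank, division, new_lp
-- ===== SOURCE B (Python) =====
-- def update_rank_and_division(rank, division, lp_change):
--     ranks = ['Iron', 'Bronze', 'Silver', 'Gold', 'Platinum', 'Diamond', 'Master', 'Grandmaster', 'Challenger']
--     divisions = ['IV', 'III', 'II', 'I']
--
--     division_index = divisions.index(division)
--     if lp_change < 100:
--         return rank, division, lp_change
--
--     steps = lp_change // 100
--     new_lp = lp_change % 100
--     while steps > 0:
--         if steps <= division_index: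
--             division_index -= steps
--             steps = 0
--         else:
--             steps -= division_index + 1
--             i = ranks.index(rank)
--             if i < len(ranks) - 1:
--                 rank = ranks[i + 1]
--                 division_index = 3
--             else:
--                 break
--     return rank, divisions[division_index], new_lp
-- ===== Notes on version B (the rewrite author's own statement) =====
-- stated objective: alternative
-- what changed: B replaces A's one-iteration-per-100-LP stepping loop by divmod arithmetic (steps = lp//100, new_lp = lp%100) and a chunked climb that consumes a whole division run or a whole rank-up per iteration, so it does at most one loop iteration per rank-up instead of one per 100 LP.
import Mathlib
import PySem

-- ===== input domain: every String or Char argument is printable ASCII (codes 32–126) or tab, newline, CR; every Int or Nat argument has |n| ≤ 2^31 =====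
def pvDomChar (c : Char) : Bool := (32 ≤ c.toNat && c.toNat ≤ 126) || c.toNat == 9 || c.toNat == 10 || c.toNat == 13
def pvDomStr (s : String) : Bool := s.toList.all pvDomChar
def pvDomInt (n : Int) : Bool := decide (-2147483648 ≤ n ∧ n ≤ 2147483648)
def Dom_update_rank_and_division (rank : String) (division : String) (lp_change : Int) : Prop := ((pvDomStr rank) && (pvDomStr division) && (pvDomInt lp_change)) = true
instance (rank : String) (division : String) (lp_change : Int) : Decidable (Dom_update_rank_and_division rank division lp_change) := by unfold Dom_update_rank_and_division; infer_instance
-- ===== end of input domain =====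

-- B replaces A's per-100-LP stepping loop with divmod arithmetic and a chunked climb
-- (one loop iteration per rank-up); objective: alternative (not measured faster on the
-- bounded inputs Pre_ admits).

def pvRanks : List String :=
  ["Iron", "Bronze", "Silver", "Gold", "Platinum", "Diamond", "Master", "Grandmaster", "Challenger"]

def pvDivs : List String := ["IV", "III", "II", "I"]

-- ===== PORT A =====
-- A's while-loop, one iteration per 100 LP; fuel bounds the iteration count (within
-- Pre_ the loop terminates in at most lp_change iterations, so the fuel is never hit).
-- The `none` branch of `index?` is Python's ValueError; Pre_ excludes it.
def pvALoop (fuel : Nat) (r : String) (di : Int) (lp : Int) : String × Int × Int :=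
  match fuel with
  | 0 => (r, di, lp)
  | f + 1 =>
    if lp ≥ 100 then
      let lp' := lp - 100
      if di > 0 then pvALoop f r (di - 1) lp'
      else
        match PySem.List.index? pvRanks r with
        | none => ("", 0, 0)   -- ValueError (excluded by Pre_)
        | some i =>
          if (i : Int) < 8 then pvALoop f (pvRanks.getD (i + 1) "") 3 lp'
          else pvALoop f r di 100   -- Challenger: A loops forever (excluded by Pre_)
    else (r, di, lp)

def update_rank_and_division (rank : String) (division : String) (lp_change : Int) : String × String × Int :=
  match PySem.List.index? pvDivs division with
  | none => ("", "", 0)   -- ValueError (excluded by Pre_)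
  | some d =>
    let res := pvALoop (lp_change.toNat + 1) rank (d : Int) lp_change
    (res.1, PySem.List.pyGetD pvDivs res.2.1 "", res.2.2)

-- ===== PORT B =====
-- B's chunked loop: each iteration consumes either all remaining steps (inside the
-- current rank) or division_index + 1 steps and one rank-up.
def pvBLoop (r : String) (di : Nat) (steps : Int) : String × Nat :=
  if _hs : steps > 0 then
    if steps ≤ (di : Int) then (r, di - steps.toNat)
    else
      match PySem.List.index? pvRanks r with
      | none => ("", 0)   -- ValueError (excluded by Pre_)
      | some i =>
        if i < 8 then pvBLoop (pvRanks.getD (i + 1) "") 3 (steps - ((di : Int) + 1))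
        else (r, di)   -- break at Challenger (excluded by Pre_)
  else (r, di)
termination_by steps.toNat
decreasing_by omega

def update_rank_and_division_alt (rank : String) (division : String) (lp_change : Int) : String × String × Int :=
  match PySem.List.index? pvDivs division with
  | none => ("", "", 0)   -- ValueError (excluded by Pre_)
  | some d =>
    if lp_change < 100 then (rank, division, lp_change)
    else
      let steps := PySem.Int.floordiv lp_change 100
      let new_lp := PySem.Int.mod lp_change 100
      let res := pvBLoop rank d steps
      (res.1, PySem.List.pyGetD pvDivs (res.2 : Int) "", new_lp)

-- ===== PRECONDITION & SPEC =====
-- Pre_ is exactly the set of inputs on which Python A returns normally: the division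
-- must be a valid division name (else ValueError), and if the loop reaches a rank
-- boundary (steps > division_index) the rank must be valid (else ValueError) and the
-- needed number of rank-ups must not push past Challenger (else A loops forever).
def pvPreCheck (rank : String) (division : String) (lp_change : Int) : Bool :=
  match PySem.List.index? pvDivs division with
  | none => false
  | some d =>
    let s := PySem.Int.floordiv lp_change 100
    decide (s ≤ (d : Int)) ||
      match PySem.List.index? pvRanks rank with
      | none => false
      | some i => decide ((i : Int) + PySem.Int.floordiv (s - (d : Int) + 3) 4 ≤ 8)

def Pre_update_rank_and_division (rank : String) (division : String) (lp_change : Int) : Prop :=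
  pvPreCheck rank division lp_change = true

instance (rank : String) (division : String) (lp_change : Int) : Decidable (Pre_update_rank_and_division rank division lp_change) := by
  unfold Pre_update_rank_and_division; infer_instance

def pvWitness_update_rank_and_division : String × String × Int := ("Gold", "II", 250)

def Spec_update_rank_and_division (rank : String) (division : String) (lp_change : Int) (out : String × String × Int) : Prop := out = update_rank_and_division_alt rank division lp_change
instance (rank : String) (division : String) (lp_change : Int) (out : String × String × Int) : Decidable (Spec_update_rank_and_division rank division lp_change out) := by unfold Spec_update_rank_and_division; infer_instance

-- ===== CLAIM (what is proved, stated in full; the proofs are below) =====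
def Claim_equal_update_rank_and_division : Prop := ∀ (rank : String) (division : String) (lp_change : Int), Dom_update_rank_and_division rank division lp_change → Pre_update_rank_and_division rank division lp_change → Spec_update_rank_and_division rank division lp_change (update_rank_and_division rank division lp_change)

-- ===== LEMMAS AND PROOFS =====

-- Climbing from rank index i (i < 8) lands on the rank of index i + 1.
lemma pv_rank_step (i : Nat) (hi : i < 8) :
    PySem.List.index? pvRanks (pvRanks.getD (i + 1) "") = some (i + 1) := by
  interval_cases i <;> decide

-- A's loop returns the state unchanged once new_lp < 100.
lemma pvALoop_terminal (fuel : Nat) (r : String) (di lp : Int) (h : lp < 100) :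
    pvALoop fuel r di lp = (r, di, lp) := by
  cases fuel <;> simp [pvALoop, not_le.mpr h]

-- Unrolling k pure-decrement iterations of A's loop.
lemma pvALoop_unroll (k : Nat) : ∀ (fuel : Nat) (r : String) (di lp : Int),
    k ≤ fuel → (k : Int) ≤ di → 100 * k ≤ lp →
    pvALoop fuel r di lp = pvALoop (fuel - k) r (di - k) (lp - 100 * k) := by
  induction k with
  | zero => intro fuel r di lp _ _ _; simp
  | succ k ih =>
    intro fuel r di lp hf hd hl
    obtain ⟨f, rfl⟩ : ∃ f, fuel = f + 1 := ⟨fuel - 1, by omega⟩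
    have h100 : lp ≥ 100 := by push_cast at hl; omega
    have hdi : di > 0 := by push_cast at hd; omega
    have : pvALoop (f + 1) r di lp = pvALoop f r (di - 1) (lp - 100) := by
      simp [pvALoop, h100, hdi]
    rw [this, ih f r (di - 1) (lp - 100) (by omega) (by push_cast at hd ⊢; omega)
          (by push_cast at hl ⊢; omega)]
    congr 1 <;> push_cast <;> omega

-- The state invariant: either the remaining steps stay inside the current rank, or
-- the rank is valid and the rank-ups still needed fit below Challenger.
def pvSafe (r : String) (d : Nat) (lp : Int) : Prop :=
  lp / 100 ≤ (d : Int) ∨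
    ∃ i : Nat, PySem.List.index? pvRanks r = some i ∧
      (i : Int) + (lp / 100 - (d : Int) + 3) / 4 ≤ 8

-- Main simulation lemma: A's loop computes what B's chunked loop computes.
lemma pv_main : ∀ (n fuel : Nat) (r : String) (d : Nat) (lp : Int),
    d ≤ 3 → pvSafe r d lp → lp / 100 ≤ (n : Int) → lp / 100 ≤ (fuel : Int) →
    pvALoop fuel r (d : Int) lp =
      ((pvBLoop r d (lp / 100)).1, ((pvBLoop r d (lp / 100)).2 : Int),
       if lp < 100 then lp else lp % 100) := by
  intro n
  induction n with
  | zero =>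
    intro fuel r d lp _ _ hn _
    have hlp : lp < 100 := by omega
    rw [pvALoop_terminal _ _ _ _ hlp, pvBLoop]
    simp [show ¬ lp / 100 > 0 by omega, hlp]
  | succ n ih =>
    intro fuel r d lp hd hsafe hn hfuel
    by_cases hlp : lp < 100
    · rw [pvALoop_terminal _ _ _ _ hlp, pvBLoop]
      simp [show ¬ lp / 100 > 0 by omega, hlp]
    · have hs1 : 1 ≤ lp / 100 := by omega
      by_cases hsd : lp / 100 ≤ (d : Int)
      · -- stays inside the current rank: (lp/100) pure decrements, then terminal
        have hkd : ((lp / 100).toNat : Int) = lp / 100 := by omega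
        rw [pvALoop_unroll (lp / 100).toNat fuel r (d : Int) lp (by omega)
              (by omega) (by omega)]
        rw [pvALoop_terminal _ _ _ _ (by omega)]
        rw [pvBLoop]
        simp only [show lp / 100 > 0 by omega, dite_true, if_pos hsd, if_neg hlp]
        simp only [Prod.mk.injEq]
        refine ⟨trivial, by omega, by omega⟩
      · -- crosses a rank boundary: d decrements, then one rank-up chunk
        obtain ⟨i, hi, hups⟩ : ∃ i : Nat,
            PySem.List.index? pvRanks r = some i ∧
            (i : Int) + (lp / 100 - (d : Int) + 3) / 4 ≤ 8 := by
          rcases hsafe with h | h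
          · omega
          · exact h
        have hi8 : i < 8 := by
          have : 1 ≤ (lp / 100 - (d : Int) + 3) / 4 := by omega
          omega
        have hlpd : 100 * (d : Int) + 100 ≤ lp := by omega
        rw [pvALoop_unroll d fuel r (d : Int) lp (by omega) (by omega) (by omega)]
        obtain ⟨f, hf⟩ : ∃ f, fuel - d = f + 1 := ⟨fuel - d - 1, by omega⟩
        rw [hf]
        have hi' : List.idxOf? r pvRanks = some i := by
          simpa [PySem.List.index?_eq_idxOf?] using hi
        have hstep : pvALoop (f + 1) r ((d : Int) - d) (lp - 100 * d) =
            pvALoop f (pvRanks.getD (i + 1) "") 3 (lp - 100 * d - 100) := by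
          simp [pvALoop, show lp - 100 * (d : Int) ≥ 100 by omega, hi',
                show ((i : Int) < 8) by omega]
        rw [hstep]
        set lp' : Int := lp - 100 * d - 100 with hlp'
        have hq : lp' / 100 = lp / 100 - (d : Int) - 1 := by omega
        have happ := ih f (pvRanks.getD (i + 1) "") 3 lp' (by omega)
          (Or.inr ⟨i + 1, pv_rank_step i hi8, by push_cast; omega⟩)
          (by omega) (by omega)
        rw [show (((3:Nat)):Int) = (3:Int) by norm_num] at happ
        rw [happ]
        -- relate one chunk of B's loop
        have hb : pvBLoop r d (lp / 100) =
            pvBLoop (pvRanks.getD (i + 1) "") 3 (lp' / 100) := by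
          rw [pvBLoop]
          simp only [show lp / 100 > 0 by omega, dite_true, if_neg hsd, hi, hi8, hq, if_true]
          congr 1
          ring
        rw [hb]
        have h3 : (if lp' < 100 then lp' else lp' % 100) = lp % 100 := by
          split_ifs <;> omega
        rw [h3, if_neg hlp]

-- index? into pvDivs pins the division string and bounds the index.
lemma pv_div_index (division : String) (d : Nat)
    (h : PySem.List.index? pvDivs division = some d) :
    d ≤ 3 ∧ PySem.List.pyGetD pvDivs (d : Int) "" = division := by
  obtain ⟨hk, hv, -⟩ := PySem.List.getElem_of_index?_eq_some h
  have hd3 : d ≤ 3 := by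
    have := hk; simp [pvDivs] at this; omega
  refine ⟨hd3, ?_⟩
  rw [← hv, PySem.List.pyGetD_natCast]
  exact List.getD_eq_getElem _ _ hk

-- ===== VERDICT (by name: the statement is the Claim_ definition above) =====
theorem update_rank_and_division_spec : Claim_equal_update_rank_and_division := by
  intro rank division lp_change _ hpre
  unfold Spec_update_rank_and_division
  unfold Pre_update_rank_and_division pvPreCheck at hpre
  unfold update_rank_and_division update_rank_and_division_alt
  simp only [PySem.List.index?_eq_idxOf?] at hpre ⊢
  rcases Option.eq_none_or_eq_some (List.idxOf? division pvDivs) with hdd | ⟨d, hdd⟩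
  · rw [hdd]
  · rw [hdd] at hpre ⊢
    dsimp only at hpre ⊢
    have hdd' : PySem.List.index? pvDivs division = some d := by
      rw [PySem.List.index?_eq_idxOf?]; exact hdd
    obtain ⟨hd3, hget⟩ := pv_div_index division d hdd'
    have hfd : PySem.Int.floordiv lp_change 100 = lp_change / 100 :=
      PySem.Int.floordiv_eq_ediv_of_pos (by omega)
    have hmd : PySem.Int.mod lp_change 100 = lp_change % 100 :=
      PySem.Int.mod_eq_emod_of_pos (by omega)
    have hsafe : pvSafe rank d lp_change := by
      simp only [hfd, Bool.or_eq_true, decide_eq_true_eq] at hpre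
      rcases hpre with h | h
      · exact Or.inl h
      · rcases Option.eq_none_or_eq_some (List.idxOf? rank pvRanks) with hrr | ⟨i, hrr⟩
        · rw [hrr] at h; simp at h
        · rw [hrr] at h
          dsimp only at h
          simp only [decide_eq_true_eq] at h
          rw [PySem.Int.floordiv_eq_ediv_of_pos (by omega : (0:Int) < 4)] at h
          refine Or.inr ⟨i, ?_, h⟩
          rw [PySem.List.index?_eq_idxOf?]; exact hrr
    by_cases hlt : lp_change < 100
    · rw [pvALoop_terminal _ _ _ _ hlt]
      simp only [if_pos hlt, hget]
    · have hmain := pv_main (lp_change / 100).toNat (lp_change.toNat + 1) rank d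
        lp_change hd3 hsafe (by omega) (by omega)
      rw [hmain, hfd, hmd]
      simp only [if_neg hlt]
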